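-- pv_equiv track=rewrite | github.com/hackthegist/problem-solving | Hackerrank/2019_윈터코딩_CREMA_Lab/01.py | numofPrizes
-- ===== SOURCE A (Python) =====
-- def numofPrizes(k, marks):
--     sorted_marks = sorted(marks, reverse=True)
--
--     zero_idx = -1
--     for i in range(len(sorted_marks)-1, -1, -1):
--         if not sorted_marks[i]:
--             zero_idx = i
--         else:
--             break
--     if zero_idx >= 0:
--         sorted_marks = sorted_marks[:zero_idx]
--
--     if not sorted_marks:
--         return 0
--
--     r, ranks = 1, [1]
--     for i in range(1, len(sorted_marks)):
--         r += 1
--         if sorted_marks[i-1] == sorted_marks[i]: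
--             ranks.append(ranks[-1])
--         else:
--             ranks.append(r)
--
--
--
--     for i in range(len(sorted_marks)):
--         if ranks[i] > k:
--             ans = i
--             break
--     else:
--         ans = i + 1
--
--     return ans
-- ===== SOURCE B (Python) =====
-- def numofPrizes(k, marks):
--     s = sorted(marks, reverse=True)
--     while s and not s[-1]:
--         s.pop()
--     n = len(s)
--     total = 0
--     i = 0
--     while i < n and total < k:
--         j = i + 1
--         while j < n and s[j] == s[i]:
--             j += 1
--         total += j - i
--         i = j
--     return total
-- ===== Notes on version B (the rewrite author's own statement) =====
-- stated objective: simpler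
-- what changed: B drops A's per-element competition-rank array and the separate rank>k scan: after the same sort and trailing-zero strip it makes one walk over runs of equal values, accumulating run sizes while the running count is below k.
import Mathlib
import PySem

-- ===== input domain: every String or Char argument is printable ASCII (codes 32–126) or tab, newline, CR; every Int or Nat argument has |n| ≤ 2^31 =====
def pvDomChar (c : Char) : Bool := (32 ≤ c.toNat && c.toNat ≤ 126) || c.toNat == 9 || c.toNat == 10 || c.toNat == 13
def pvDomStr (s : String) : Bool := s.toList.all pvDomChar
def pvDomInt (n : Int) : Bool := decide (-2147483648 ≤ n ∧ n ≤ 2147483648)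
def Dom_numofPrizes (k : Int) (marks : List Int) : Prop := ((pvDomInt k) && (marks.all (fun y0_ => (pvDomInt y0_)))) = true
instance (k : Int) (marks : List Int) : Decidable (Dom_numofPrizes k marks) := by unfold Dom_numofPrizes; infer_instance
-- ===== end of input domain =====

-- B replaces A's per-element rank array and rank>k scan by a single walk over runs of
-- equal values in the sorted list, keeping a running count; objective: simpler.

-- ===== PORT A =====
-- for i in range(len(s)-1, -1, -1): if not s[i]: zero_idx = i ; else: break
def pvA_zeroScan (s : List Int) : List Int → Int → Int
  | [], z => z
  | i :: rest, z =>
    if PySem.List.pyGetD s i 0 = 0 then pvA_zeroScan s rest i else z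

-- for i in range(1, len(s)): r += 1; ranks.append(ranks[-1] if s[i-1]==s[i] else r)
def pvA_build (s : List Int) : List Int → Int → List Int → Int × List Int
  | [], r, ranks => (r, ranks)
  | i :: rest, r, ranks =>
    pvA_build s rest (r + 1)
      (ranks ++ [if PySem.List.pyGetD s (i - 1) 0 = PySem.List.pyGetD s i 0
                 then PySem.List.pyGetD ranks (-1) 0 else r + 1])

-- for i in range(len(s)): if ranks[i] > k: ans = i; break ; else: ans = i + 1
def pvA_find (k : Int) (ranks : List Int) : List Int → Int → Int
  | [], last => last + 1
  | i :: rest, _ =>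
    if PySem.List.pyGetD ranks i 0 > k then i else pvA_find k ranks rest i

def numofPrizes (k : Int) (marks : List Int) : Int :=
  let sm := PySem.List.sorted marks (fun x => x) true
  let z := pvA_zeroScan sm (PySem.List.pyRange ((sm.length : Int) - 1) (-1) (-1)) (-1)
  let s := if z ≥ 0 then PySem.List.slice sm none (some z) else sm
  if s = [] then 0
  else
    pvA_find k (pvA_build s (PySem.List.pyRange 1 (s.length : Int) 1) 1 [1]).2
      (PySem.List.pyRange 0 (s.length : Int) 1) 0

-- ===== PORT B =====
-- while s and not s[-1]: s.pop()
def pvB_strip (s : List Int) : List Int :=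
  if s ≠ [] ∧ PySem.List.pyGetD s (-1) 0 = 0 then pvB_strip s.dropLast else s
termination_by s.length
decreasing_by
  rename_i h
  have := List.length_pos_iff.mpr h.1
  simp [List.length_dropLast]; omega

-- inner: while j < n and s[j] == s[i]: j += 1
def pvB_scan (s : List Int) (n i : Nat) (j : Nat) : Nat :=
  if j < n ∧ s.getD j 0 = s.getD i 0 then pvB_scan s n i (j + 1) else j
termination_by n - j
decreasing_by rename_i h; omega

theorem pvB_scan_ge (s : List Int) (n i j : Nat) : j ≤ pvB_scan s n i j := by
  rw [pvB_scan]
  split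
  · exact le_trans (Nat.le_succ j) (pvB_scan_ge s n i (j + 1))
  · exact le_refl j
termination_by n - j
decreasing_by rename_i h; omega

-- outer: while i < n and total < k: j = scan; total += j - i; i = j
def pvB_loop (k : Int) (s : List Int) (n : Nat) (i : Nat) (total : Int) : Int :=
  if i < n ∧ total < k then
    let j := pvB_scan s n i (i + 1)
    pvB_loop k s n j (total + ((j : Int) - (i : Int)))
  else total
termination_by n - i
decreasing_by
  rename_i h
  have := pvB_scan_ge s n i (i + 1)
  omega

def numofPrizes_alt (k : Int) (marks : List Int) : Int :=
  let s := pvB_strip (PySem.List.sorted marks (fun x => x) true)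
  pvB_loop k s s.length 0 0

-- ===== PRECONDITION & SPEC =====
def Spec_numofPrizes (k : Int) (marks : List Int) (out : Int) : Prop := out = numofPrizes_alt k marks
instance (k : Int) (marks : List Int) (out : Int) : Decidable (Spec_numofPrizes k marks out) := by unfold Spec_numofPrizes; infer_instance

-- ===== CLAIM (what is proved, stated in full; the proofs are below) =====
def Claim_equal_numofPrizes : Prop := ∀ (k : Int) (marks : List Int), Dom_numofPrizes k marks → Spec_numofPrizes k marks (numofPrizes k marks)

-- ===== LEMMAS AND PROOFS =====

-- proof-side helpers: rks = A's competition rank at an index; zrun/ztake = where the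
-- trailing-zero strip cuts the sorted list
def rks (s : List Int) : Nat → Int
  | 0 => 1
  | m + 1 => if s.getD m 0 = s.getD (m + 1) 0 then rks s m else ((m : Int) + 2)

def zrun (s : List Int) : Nat → Nat
  | 0 => 0
  | j + 1 => if s.getD j 0 = 0 then zrun s j else j + 1



theorem zeroScan_char (s : List Int) (j : Nat) : ∀ (z : Int), j < s.length →
    pvA_zeroScan s (PySem.List.pyRange (j : Int) (-1) (-1)) z =
      if s.getD j 0 = 0 then ((zrun s (j + 1) : Nat) : Int) else z := by
  induction j with
  | zero =>
    intro z hj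
    rw [PySem.List.pyRange_neg_one_cons (by omega)]
    rw [show ((0:Nat):Int) - 1 = -1 by omega, PySem.List.pyRange_neg_one_eq_nil (by omega)]
    have h0 : PySem.List.pyGetD s ((0:Nat):Int) 0 = s.getD 0 0 := PySem.List.pyGetD_natCast s 0 0
    simp only [pvA_zeroScan, Nat.cast_zero] at *
    rw [h0]
    simp only [zrun]
    split <;> simp_all
  | succ m ih =>
    intro z hj
    rw [PySem.List.pyRange_neg_one_cons (by omega)]
    rw [show ((m+1:Nat):Int) - 1 = (m:Int) by push_cast; ring]
    show (if PySem.List.pyGetD s ((m+1:Nat):Int) 0 = 0 then _ else z) = _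
    rw [PySem.List.pyGetD_natCast s (m+1) 0]
    by_cases h1 : s.getD (m+1) 0 = 0
    · rw [if_pos h1, if_pos h1, ih _ (by omega)]
      have hz : zrun s (m+1+1) = zrun s (m+1) := by rw [zrun, if_pos h1]
      rw [hz]
      by_cases h2 : s.getD m 0 = 0
      · rw [if_pos h2]
      · rw [if_neg h2]
        rw [show zrun s (m+1) = m+1 by rw [zrun, if_neg h2]]
    · rw [if_neg h1, if_neg h1]

theorem zrun_le (s : List Int) (j : Nat) : zrun s j ≤ j := by
  induction j with
  | zero => simp [zrun]
  | succ m ih => rw [zrun]; split <;> omega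

def ztake (s : List Int) : Nat :=
  if s = [] then 0
  else if s.getD (s.length - 1) 0 = 0 then zrun s s.length else s.length

theorem zrun_prefix (u : List Int) (a : Int) : ∀ j, j ≤ u.length → zrun (u ++ [a]) j = zrun u j := by
  intro j
  induction j with
  | zero => intro; rfl
  | succ m ih =>
    intro h
    rw [zrun, zrun, List.getD_append _ _ _ _ (by omega), ih (by omega)]

theorem Aform_eq (s : List Int) :
    (if pvA_zeroScan s (PySem.List.pyRange ((s.length : Int) - 1) (-1) (-1)) (-1) ≥ 0
     then PySem.List.slice s none
        (some (pvA_zeroScan s (PySem.List.pyRange ((s.length : Int) - 1) (-1) (-1)) (-1)))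
     else s) = s.take (ztake s) := by
  by_cases hs : s = []
  · subst hs; simp [pvA_zeroScan, ztake]
  · have hl : 0 < s.length := List.length_pos_iff.mpr hs
    rw [show ((s.length : Int) - 1) = ((s.length - 1 : Nat) : Int) by omega]
    rw [zeroScan_char s (s.length - 1) (-1) (by omega)]
    rw [ztake, if_neg hs]
    by_cases h : s.getD (s.length - 1) 0 = 0
    · rw [if_pos h, if_pos h]
      rw [show s.length - 1 + 1 = s.length by omega]
      rw [if_pos (by positivity)]
      exact PySem.List.slice_to_natCast s (zrun s s.length)
    · rw [if_neg h, if_neg h, if_neg (by omega)]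
      rw [List.take_length]

theorem Bform_eq (s : List Int) : pvB_strip s = s.take (ztake s) := by
  induction s using List.reverseRecOn with
  | nil => rw [pvB_strip]; simp [ztake]
  | append_singleton u a ih =>
    rw [pvB_strip]
    by_cases ha : a = 0
    · rw [if_pos ⟨by simp, by rw [PySem.List.pyGetD_neg_one_append_singleton]; exact ha⟩]
      rw [List.dropLast_concat, ih]
      have hz : ztake (u ++ [a]) = zrun u u.length := by
        rw [ztake, if_neg (by simp)]
        have hg : (u ++ [a]).getD ((u ++ [a]).length - 1) 0 = a := by
          simp [List.getD_eq_getElem?_getD]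
        rw [if_pos (by rw [hg]; exact ha)]
        have : (u ++ [a]).length = u.length + 1 := by simp
        rw [this, zrun]
        have hga : (u ++ [a]).getD u.length 0 = a := by simp [List.getD_eq_getElem?_getD]
        rw [hga, if_pos ha, zrun_prefix u a u.length le_rfl]
      rw [hz, List.take_append_of_le_length (zrun_le u u.length)]
      by_cases hu : u = []
      · subst hu; rfl
      · have hl : 0 < u.length := List.length_pos_iff.mpr hu
        rw [ztake, if_neg hu]
        by_cases h : u.getD (u.length - 1) 0 = 0
        · rw [if_pos h]
        · rw [if_neg h]
          congr 1
          rw [show u.length = u.length - 1 + 1 by omega, zrun, if_neg h]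
    · rw [if_neg (by
        rintro ⟨-, hg⟩
        rw [PySem.List.pyGetD_neg_one_append_singleton] at hg
        exact ha hg)]
      rw [ztake, if_neg (by simp)]
      have hg : (u ++ [a]).getD ((u ++ [a]).length - 1) 0 = a := by
        simp [List.getD_eq_getElem?_getD]
      rw [if_neg (by rw [hg]; exact ha), List.take_length]

theorem strip_eq' (s : List Int) :
    (if pvA_zeroScan s (PySem.List.pyRange ((s.length : Int) - 1) (-1) (-1)) (-1) ≥ 0
     then PySem.List.slice s none
        (some (pvA_zeroScan s (PySem.List.pyRange ((s.length : Int) - 1) (-1) (-1)) (-1)))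
     else s) = pvB_strip s := by
  rw [Aform_eq, Bform_eq]

theorem build_char (s : List Int) : ∀ (fuel : Nat) (i : Nat) (ranks : List Int),
    s.length - i ≤ fuel → 1 ≤ i → i ≤ s.length → ranks.length = i →
    (∀ m, m < i → ranks.getD m 0 = rks s m) →
    ((pvA_build s (PySem.List.pyRange (i : Int) (s.length : Int) 1) (i : Int) ranks).2.length = s.length ∧
     ∀ m, m < s.length →
       (pvA_build s (PySem.List.pyRange (i : Int) (s.length : Int) 1) (i : Int) ranks).2.getD m 0 = rks s m) := by
  intro fuel
  induction fuel with
  | zero =>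
    intro i ranks hf h1 h2 hlen hm
    have : i = s.length := by omega
    subst this
    rw [PySem.List.pyRange_one_eq_nil (le_refl _)]
    exact ⟨hlen, fun m hm' => hm m (by omega)⟩
  | succ fuel ih =>
    intro i ranks hf h1 h2 hlen hm
    by_cases hlt : i < s.length
    · rw [PySem.List.pyRange_one_cons (by exact_mod_cast hlt)]
      simp only [pvA_build]
      have hrne : ranks ≠ [] := by intro h; rw [h] at hlen; simp at hlen; omega
      have hgl : PySem.List.pyGetD ranks (-1) 0 = ranks.getD (i - 1) 0 := by
        rw [PySem.List.pyGetD_neg_one ranks 0 hrne]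
        rw [List.getD_eq_getElem?_getD, List.getElem?_eq_getElem (by omega)]
        simp only [Option.getD_some, List.getLast_eq_getElem]
        congr 1
        omega
      have hi1 : ((i : Int) - 1) = ((i - 1 : Nat) : Int) := by omega
      have he : (if PySem.List.pyGetD s ((i : Int) - 1) 0 = PySem.List.pyGetD s (i : Int) 0
                 then PySem.List.pyGetD ranks (-1) 0 else (i : Int) + 1) = rks s i := by
        rw [hi1, PySem.List.pyGetD_natCast, PySem.List.pyGetD_natCast, hgl,
            hm (i - 1) (by omega)]
        rw [show i = (i - 1) + 1 by omega, rks]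
        rw [show (i - 1 : Nat) + 1 = i by omega]
        split
        · rfl
        · omega
      rw [he]
      have hcast : ((i : Int) + 1) = (((i + 1 : Nat)) : Int) := by push_cast; ring
      rw [hcast]
      apply ih (i + 1) (ranks ++ [rks s i]) (by omega) (by omega) (by omega) (by simp [hlen])
      intro m hm'
      by_cases hmi : m < i
      · rw [List.getD_append _ _ _ _ (by omega), hm m hmi]
      · have : m = i := by omega
        subst this
        rw [List.getD_eq_getElem?_getD, ← hlen, List.getElem?_concat_length]
        rfl
    · have : i = s.length := by omega
      subst this
      rw [PySem.List.pyRange_one_eq_nil (le_refl _)]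
      exact ⟨hlen, fun m hm' => hm m (by omega)⟩

theorem scan_le (s : List Int) (n i j : Nat) (h : j ≤ n) : pvB_scan s n i j ≤ n := by
  rw [pvB_scan]
  split
  · exact scan_le s n i (j + 1) (by rename_i h'; omega)
  · exact h
termination_by n - j
decreasing_by rename_i h'; omega

theorem scan_run (s : List Int) (n i : Nat) : ∀ j m, j ≤ m → m < pvB_scan s n i j →
    s.getD m 0 = s.getD i 0 := by
  intro j m h1 h2
  by_cases hc : j < n ∧ s.getD j 0 = s.getD i 0
  · rcases Nat.eq_or_lt_of_le h1 with he | hl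
    · rw [← he]; exact hc.2
    · rw [pvB_scan, if_pos hc] at h2
      exact scan_run s n i (j + 1) m (by omega) h2
  · rw [pvB_scan, if_neg hc] at h2
    omega
termination_by j => n - j
decreasing_by omega

theorem scan_stop (s : List Int) (n i : Nat) : ∀ j, j ≤ n →
    pvB_scan s n i j = n ∨ s.getD (pvB_scan s n i j) 0 ≠ s.getD i 0 := by
  intro j hj
  by_cases hc : j < n ∧ s.getD j 0 = s.getD i 0
  · rw [pvB_scan, if_pos hc]
    exact scan_stop s n i (j + 1) (by omega)
  · rw [pvB_scan, if_neg hc]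
    by_cases hjn : j < n
    · right; intro heq; exact hc ⟨hjn, heq⟩
    · left; omega
termination_by j => n - j
decreasing_by omega

theorem find_all_skip (k : Int) (ranks : List Int) (n i : Nat) (last : Int) (hi : i < n)
    (hm : ∀ m, i ≤ m → m < n → ¬ ranks.getD m 0 > k) :
    pvA_find k ranks (PySem.List.pyRange (i : Int) (n : Int) 1) last = (n : Int) := by
  rw [PySem.List.pyRange_one_cons (by exact_mod_cast hi)]
  simp only [pvA_find, PySem.List.pyGetD_natCast]
  rw [if_neg (hm i le_rfl hi)]
  by_cases h2 : i + 1 < n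
  · rw [show ((i : Int) + 1) = ((i + 1 : Nat) : Int) by push_cast; ring]
    exact find_all_skip k ranks n (i + 1) (i : Int) h2 (fun m hm1 hm2 => hm m (by omega) hm2)
  · rw [show ((i : Int) + 1) = ((n : Nat) : Int) by omega]
    rw [PySem.List.pyRange_one_eq_nil le_rfl]
    simp only [pvA_find]
    omega
termination_by n - i

theorem find_skip_to (k : Int) (ranks : List Int) (n j i : Nat) (last last' : Int)
    (hij : i ≤ j) (hj : j < n)
    (hm : ∀ m, i ≤ m → m < j → ¬ ranks.getD m 0 > k) :
    pvA_find k ranks (PySem.List.pyRange (i : Int) (n : Int) 1) last =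
    pvA_find k ranks (PySem.List.pyRange (j : Int) (n : Int) 1) last' := by
  rcases Nat.eq_or_lt_of_le hij with he | hl
  · subst he
    rw [PySem.List.pyRange_one_cons (by exact_mod_cast hj)]
    simp only [pvA_find]
  · rw [PySem.List.pyRange_one_cons (show (i : Int) < (n : Int) by exact_mod_cast (by omega : i < n))]
    simp only [pvA_find, PySem.List.pyGetD_natCast]
    rw [if_neg (hm i le_rfl hl)]
    rw [show ((i : Int) + 1) = ((i + 1 : Nat) : Int) by push_cast; ring]
    exact find_skip_to k ranks n j (i + 1) (i : Int) last' (by omega) hj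
      (fun m h1 h2 => hm m (by omega) h2)
termination_by j - i

theorem rks_run (t : List Int) (i j : Nat)
    (hrun : ∀ m, i + 1 ≤ m → m < j → t.getD m 0 = t.getD i 0) :
    ∀ m, i ≤ m → m < j → rks t m = rks t i := by
  intro m h1 h2
  rcases Nat.eq_or_lt_of_le h1 with he | hl
  · rw [← he]
  · obtain ⟨m', rfl⟩ : ∃ m', m = m' + 1 := ⟨m - 1, by omega⟩
    rw [rks]
    have hm1 : t.getD (m' + 1) 0 = t.getD i 0 := hrun (m' + 1) (by omega) h2
    have hm0 : t.getD m' 0 = t.getD i 0 := by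
      rcases Nat.eq_or_lt_of_le (show i ≤ m' by omega) with he' | hl'
      · rw [← he']
      · exact hrun m' (by omega) (by omega)
    rw [if_pos (by rw [hm0, hm1])]
    exact rks_run t i j hrun m' (by omega) (by omega)
termination_by m => m

theorem main_eq (k : Int) (t ranks : List Int)
    (hr : ∀ m, m < t.length → ranks.getD m 0 = rks t m)
    (i : Nat) (hi : i < t.length) (hrs : i = 0 ∨ t.getD (i - 1) 0 ≠ t.getD i 0) (last : Int) :
    pvA_find k ranks (PySem.List.pyRange (i : Int) ((t.length : Nat) : Int) 1) last =
    pvB_loop k t t.length i (i : Int) := by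
  have hrk : rks t i = (i : Int) + 1 := by
    by_cases h0 : i = 0
    · subst h0; simp [rks]
    · obtain ⟨m, rfl⟩ : ∃ m, i = m + 1 := ⟨i - 1, by omega⟩
      have hne := hrs.resolve_left h0
      rw [rks, if_neg (by simpa using hne)]
      push_cast; ring
  rw [PySem.List.pyRange_one_cons (by exact_mod_cast hi)]
  simp only [pvA_find, PySem.List.pyGetD_natCast]
  rw [hr i hi, hrk, pvB_loop]
  by_cases hk : (i : Int) + 1 > k
  · rw [if_pos hk, if_neg (by rintro ⟨-, h⟩; omega)]
  · rw [if_neg hk, if_pos ⟨hi, by omega⟩]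
    set j := pvB_scan t t.length i (i + 1) with hjdef
    have hge : i + 1 ≤ j := pvB_scan_ge t t.length i (i + 1)
    have hle : j ≤ t.length := scan_le t t.length i (i + 1) (by omega)
    have hrunm : ∀ m, i + 1 ≤ m → m < j → t.getD m 0 = t.getD i 0 :=
      fun m h1 h2 => scan_run t t.length i (i + 1) m h1 h2
    show _ = pvB_loop k t t.length j ((i : Int) + ((j : Int) - (i : Int)))
    rw [show (i : Int) + ((j : Int) - (i : Int)) = (j : Int) by ring]
    have hnot : ∀ m, i ≤ m → m < j → ¬ ranks.getD m 0 > k := by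
      intro m h1 h2
      rw [hr m (by omega), rks_run t i j hrunm m h1 h2, hrk]
      omega
    rcases Nat.lt_or_ge j t.length with hjn | hjn
    · have hjne : t.getD j 0 ≠ t.getD i 0 := by
        rcases scan_stop t t.length i (i + 1) (by omega) with h | h
        · omega
        · exact h
      have hjrs : t.getD (j - 1) 0 ≠ t.getD j 0 := by
        have hji : t.getD (j - 1) 0 = t.getD i 0 := by
          rcases Nat.eq_or_lt_of_le (show i ≤ j - 1 by omega) with he | hl
          · rw [← he]
          · exact hrunm (j - 1) (by omega) (by omega)
        rw [hji]
        exact fun hh => hjne hh.symm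
      rw [show ((i : Int) + 1) = ((i + 1 : Nat) : Int) by push_cast; ring]
      rw [find_skip_to k ranks t.length j (i + 1) (i : Int) 0 (by omega) hjn
        (fun m h1 h2 => hnot m (by omega) h2)]
      exact main_eq k t ranks hr j hjn (Or.inr hjrs) 0
    · have hjeq : j = t.length := by omega
      rw [hjeq, pvB_loop, if_neg (by rintro ⟨h, -⟩; omega)]
      by_cases h2 : i + 1 < t.length
      · rw [show ((i : Int) + 1) = ((i + 1 : Nat) : Int) by push_cast; ring]
        exact find_all_skip k ranks t.length (i + 1) (i : Int) h2
          (fun m hm1 hm2 => hnot m (by omega) (by omega))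
      · rw [show ((i : Int) + 1) = ((t.length : Nat) : Int) by omega]
        rw [PySem.List.pyRange_one_eq_nil le_rfl]
        simp only [pvA_find]
        omega
termination_by t.length - i
decreasing_by omega

theorem numofPrizes_eq (k : Int) (marks : List Int) :
    numofPrizes k marks = numofPrizes_alt k marks := by
  simp only [numofPrizes, numofPrizes_alt]
  rw [strip_eq' (PySem.List.sorted marks (fun x => x) true)]
  set t := pvB_strip (PySem.List.sorted marks (fun x => x) true) with hdef
  by_cases ht : t = []
  · rw [if_pos ht, ht]
    rw [pvB_loop, if_neg (by rintro ⟨h, -⟩; simp at h)]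
  · rw [if_neg ht]
    have hl : 0 < t.length := List.length_pos_iff.mpr ht
    have hb := build_char t (t.length - 1) 1 [1] (by omega) le_rfl (by omega) rfl
      (by intro m hm
          have : m = 0 := by omega
          subst this
          rfl)
    rw [show (1 : Int) = ((1 : Nat) : Int) by simp] 
    have hm := main_eq k t (pvA_build t (PySem.List.pyRange ((1 : Nat) : Int) ((t.length : Nat) : Int) 1) ((1 : Nat) : Int) [1]).2
      hb.2 0 hl (Or.inl rfl) 0
    rw [show ((0 : Nat) : Int) = (0 : Int) by simp] at hm
    exact hm

-- ===== VERDICT (by name: the statement is the Claim_ definition above) =====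
theorem numofPrizes_spec : Claim_equal_numofPrizes := by
  intro k marks _
  unfold Spec_numofPrizes
  exact numofPrizes_eq k marks
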